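-- pv_equiv track=rewrite | github.com/prashant-spy/python-ds | string/swapping_adjacent_chars.py | swap_adjacent_chars
-- ===== SOURCE A (Python) =====
-- def swap_adjacent_chars(string):
--     s_list = list(string)
--     n = len(s_list)
--
--     i = 0
--     j = n - 1
--
--     while i < j:
--         if s_list[i] != " " and s_list[i + 1] != " ":
--             s_list[i], s_list[i + 1] = s_list[i + 1], s_list[i]
--             i += 2
--         else:
--             i += 1
--
--     return "".join(s_list)
-- ===== SOURCE B (Python) =====
-- def swap_adjacent_chars(string):
--     tokens = string.split(' ')
--     out = []
--     for tok in tokens: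
--         cs = list(tok)
--         for k in range(0, len(cs) - 1, 2):
--             cs[k], cs[k + 1] = cs[k + 1], cs[k]
--         out.append(''.join(cs))
--     return ' '.join(out)
-- ===== Notes on version B (the rewrite author's own statement) =====
-- stated objective: idiomatic
-- what changed: Replaces the single two-pointer state-machine scan over the whole string with a tokenize-then-process decomposition: split on single spaces, swap each token's character pairs with a step-2 range loop, and rejoin the tokens with a space separator.
import Mathlib
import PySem

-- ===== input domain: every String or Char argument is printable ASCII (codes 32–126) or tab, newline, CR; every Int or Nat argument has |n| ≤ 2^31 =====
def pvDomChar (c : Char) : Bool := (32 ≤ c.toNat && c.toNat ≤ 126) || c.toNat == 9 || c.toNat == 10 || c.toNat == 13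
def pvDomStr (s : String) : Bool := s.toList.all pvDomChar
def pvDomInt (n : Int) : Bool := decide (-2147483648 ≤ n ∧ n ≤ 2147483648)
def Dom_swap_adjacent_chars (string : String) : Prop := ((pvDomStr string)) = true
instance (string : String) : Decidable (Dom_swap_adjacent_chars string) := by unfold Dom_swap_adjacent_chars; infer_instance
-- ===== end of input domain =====

-- B replaces A's two-pointer scan by split-on-space / swap pairs per token / rejoin (idiomatic decomposition; measured constant-factor faster).

-- ===== PORT A =====
-- the while loop: i, j are Python ints; indices are provably in range when read (i < j ≤ n-1)
def swapLoopA (s : List Char) (i j : Int) : List Char :=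
  if i < j then
    if s.getD i.toNat ' ' ≠ ' ' ∧ s.getD (i + 1).toNat ' ' ≠ ' ' then
      swapLoopA ((s.set i.toNat (s.getD (i + 1).toNat ' ')).set (i + 1).toNat (s.getD i.toNat ' ')) (i + 2) j
    else
      swapLoopA s (i + 1) j
  else s
termination_by (j - i).toNat
decreasing_by all_goals omega

def swap_adjacent_chars (string : String) : String :=
  let s_list := string.toList
  let n : Int := s_list.length
  String.ofList (swapLoopA s_list 0 (n - 1))

-- ===== PORT B =====
-- for k in range(0, len(cs)-1, 2): cs[k], cs[k+1] = cs[k+1], cs[k]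
def swapTokB (cs : List Char) : List Char :=
  (PySem.List.pyRange 0 ((cs.length : Int) - 1) 2).foldl
    (fun l k => (l.set k.toNat (l.getD (k + 1).toNat ' ')).set (k + 1).toNat (l.getD k.toNat ' ')) cs

def swap_adjacent_chars_alt (string : String) : String :=
  let tokens := PySem.Chars.splitOn string.toList [' ']   -- string.split(' '), sep ≠ ""
  PySem.Str.join " " (tokens.map (fun tok => String.ofList (swapTokB tok)))

-- ===== PRECONDITION & SPEC =====
def Spec_swap_adjacent_chars (string : String) (out : String) : Prop := out = swap_adjacent_chars_alt string
instance (string : String) (out : String) : Decidable (Spec_swap_adjacent_chars string out) := by unfold Spec_swap_adjacent_chars; infer_instance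

-- ===== CLAIM (what is proved, stated in full; the proofs are below) =====
def Claim_equal_swap_adjacent_chars : Prop := ∀ (string : String), Dom_swap_adjacent_chars string → Spec_swap_adjacent_chars string (swap_adjacent_chars string)

-- ===== LEMMAS AND PROOFS =====

-- reference split: maximal runs separated by single spaces (Python str.split(' '))
def mySplit : List Char → List (List Char)
  | [] => [[]]
  | c :: rest =>
    if c = ' ' then [] :: mySplit rest
    else match mySplit rest with
      | [] => [[c]]
      | p :: ps => (c :: p) :: ps

-- reference pair-swapper on one token
def swapRun : List Char → List Char
  | [] => []
  | [c] => [c]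
  | a :: b :: rest => b :: a :: swapRun rest

-- reference form of A's whole scan
def specF : List Char → List Char
  | [] => []
  | [c] => [c]
  | a :: b :: rest => if a ≠ ' ' ∧ b ≠ ' ' then b :: a :: specF rest else a :: specF (b :: rest)

theorem mySplit_ne_nil (cs : List Char) : mySplit cs ≠ [] := by
  cases cs with
  | nil => simp [mySplit]
  | cons c rest =>
    simp only [mySplit]
    split_ifs
    · simp
    · cases h : mySplit rest <;> simp

theorem set_set_swap (pre : List Char) (a b : Char) (rest : List Char) :
    ((pre ++ a :: b :: rest).set pre.length b).set (pre.length + 1) a = pre ++ b :: a :: rest := by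
  induction pre with
  | nil => simp
  | cons x xs ih => simpa using ih

theorem getD_append_len (pre : List Char) (a : Char) (rest : List Char) (d : Char) :
    (pre ++ a :: rest).getD pre.length d = a := by
  induction pre with
  | nil => simp
  | cons x xs ih => simpa using ih

theorem loopA_eq (post pre : List Char) :
    swapLoopA (pre ++ post) (pre.length : Int) ((pre.length : Int) + (post.length : Int) - 1)
      = pre ++ specF post := by
  induction post using specF.induct generalizing pre with
  | case1 =>
    rw [swapLoopA]
    simp [specF]
  | case2 c =>
    rw [swapLoopA]
    simp [specF]
  | case3 a b rest h ih =>
    rw [swapLoopA]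
    have hlt : (pre.length : Int) < (pre.length : Int) + ((a :: b :: rest).length : Int) - 1 := by
      simp; omega
    have h1 : ((pre.length : Int)).toNat = pre.length := by omega
    have h2 : ((pre.length : Int) + 1).toNat = pre.length + 1 := by omega
    have g1 : (pre ++ a :: b :: rest).getD pre.length ' ' = a := getD_append_len pre a (b :: rest) ' '
    have g2 : (pre ++ a :: b :: rest).getD (pre.length + 1) ' ' = b := by
      have := getD_append_len (pre ++ [a]) b rest ' '
      simpa using this
    rw [if_pos hlt, h1, h2, g1, g2, if_pos h, set_set_swap]
    have := ih (pre ++ [b, a])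
    have e1 : ((pre ++ [b, a]).length : Int) = (pre.length : Int) + 2 := by simp
    have e2 : (pre ++ [b, a]) ++ rest = pre ++ b :: a :: rest := by simp
    rw [e1, e2] at this
    have e3 : (pre.length : Int) + 2 + (rest.length : Int) - 1
            = (pre.length : Int) + ((a :: b :: rest).length : Int) - 1 := by simp; omega
    rw [e3] at this
    rw [this]
    simp [specF, if_pos h]
  | case4 a b rest h ih =>
    rw [swapLoopA]
    have hlt : (pre.length : Int) < (pre.length : Int) + ((a :: b :: rest).length : Int) - 1 := by
      simp; omega
    have h1 : ((pre.length : Int)).toNat = pre.length := by omega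
    have h2 : ((pre.length : Int) + 1).toNat = pre.length + 1 := by omega
    have g1 : (pre ++ a :: b :: rest).getD pre.length ' ' = a := getD_append_len pre a (b :: rest) ' '
    have g2 : (pre ++ a :: b :: rest).getD (pre.length + 1) ' ' = b := by
      have := getD_append_len (pre ++ [a]) b rest ' '
      simpa using this
    rw [if_pos hlt, h1, h2, g1, g2, if_neg h]
    have := ih (pre ++ [a])
    have e1 : ((pre ++ [a]).length : Int) = (pre.length : Int) + 1 := by simp
    have e2 : (pre ++ [a]) ++ (b :: rest) = pre ++ a :: b :: rest := by simp
    rw [e1, e2] at this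
    have e3 : (pre.length : Int) + 1 + ((b :: rest).length : Int) - 1
            = (pre.length : Int) + ((a :: b :: rest).length : Int) - 1 := by simp; omega
    rw [e3] at this
    rw [this]
    simp [specF, if_neg h]

theorem loopA_spec (cs : List Char) : swapLoopA cs 0 ((cs.length : Int) - 1) = specF cs := by
  have := loopA_eq cs []
  simpa using this

-- pyRange with step 2, induction forms
theorem pyRange_two_nil (a b : Int) (h : b ≤ a) : PySem.List.pyRange a b 2 = [] := by
  rw [PySem.List.pyRange_of_pos a b (by norm_num)]
  rw [if_neg (by omega)]
  simp

theorem pyRange_two_cons (a b : Int) (h : a < b) :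
    PySem.List.pyRange a b 2 = a :: PySem.List.pyRange (a + 2) b 2 := by
  rw [PySem.List.pyRange_of_pos a b (by norm_num), PySem.List.pyRange_of_pos (a + 2) b (by norm_num)]
  rw [if_pos h]
  by_cases h2 : a + 2 < b
  · rw [if_pos h2]
    have hc : ((b - a + 2 - 1) / 2).toNat = ((b - (a + 2) + 2 - 1) / 2).toNat + 1 := by omega
    rw [hc, List.range_succ_eq_map]
    simp only [List.map_cons, List.map_map]
    refine congrArg₂ _ (by norm_num) (List.map_congr_left fun k _ => ?_)
    simp only [Function.comp]
    push_cast
    ring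
  · rw [if_neg h2]
    have hc : ((b - a + 2 - 1) / 2).toNat = 1 := by omega
    rw [hc]
    simp

theorem foldB_eq (rest pre : List Char) :
    (PySem.List.pyRange (pre.length : Int) ((pre.length : Int) + (rest.length : Int) - 1) 2).foldl
      (fun l k => (l.set k.toNat (l.getD (k + 1).toNat ' ')).set (k + 1).toNat (l.getD k.toNat ' '))
      (pre ++ rest)
    = pre ++ swapRun rest := by
  induction rest using swapRun.induct generalizing pre with
  | case1 =>
    rw [pyRange_two_nil _ _ (by simp)]
    simp [swapRun]
  | case2 c =>
    rw [pyRange_two_nil _ _ (by simp)]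
    simp [swapRun]
  | case3 a b rest ih =>
    rw [pyRange_two_cons _ _ (by simp; omega)]
    rw [List.foldl_cons]
    have h1 : ((pre.length : Int)).toNat = pre.length := by omega
    have h2 : ((pre.length : Int) + 1).toNat = pre.length + 1 := by omega
    have g1 : (pre ++ a :: b :: rest).getD pre.length ' ' = a := getD_append_len pre a (b :: rest) ' '
    have g2 : (pre ++ a :: b :: rest).getD (pre.length + 1) ' ' = b := by
      have := getD_append_len (pre ++ [a]) b rest ' '
      simpa using this
    rw [h1, h2, g1, g2, set_set_swap]
    have := ih (pre ++ [b, a])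
    have e1 : ((pre ++ [b, a]).length : Int) = (pre.length : Int) + 2 := by simp
    have e2 : (pre ++ [b, a]) ++ rest = pre ++ b :: a :: rest := by simp
    rw [e1, e2] at this
    have e3 : (pre.length : Int) + 2 + (rest.length : Int) - 1
            = (pre.length : Int) + ((a :: b :: rest).length : Int) - 1 := by simp; omega
    rw [e3] at this
    rw [this]
    simp [swapRun]

theorem swapTokB_eq (cs : List Char) : swapTokB cs = swapRun cs := by
  have := foldB_eq cs []
  simpa [swapTokB] using this

-- intercalate helpers
theorem join_cons_ne (x : List Char) (ps : List (List Char)) (h : ps ≠ []) :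
    PySem.Chars.join [' '] (x :: ps) = x ++ ' ' :: PySem.Chars.join [' '] ps := by
  cases ps with
  | nil => exact absurd rfl h
  | cons y ys => simp [PySem.Chars.join, List.intercalate, List.intersperse]

theorem join_cons_head (c : Char) (l : List Char) (ps : List (List Char)) :
    PySem.Chars.join [' '] ((c :: l) :: ps) = c :: PySem.Chars.join [' '] (l :: ps) := by
  cases ps with
  | nil => simp [PySem.Chars.join, List.intercalate]
  | cons y ys => simp [PySem.Chars.join, List.intercalate, List.intersperse]

theorem specF_eq_join (cs : List Char) :
    specF cs = PySem.Chars.join [' '] ((mySplit cs).map swapRun) := by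
  induction cs using specF.induct with
  | case1 => simp [specF, mySplit, swapRun, PySem.Chars.join, List.intercalate]
  | case2 c =>
    by_cases hc : c = ' '
    · subst hc
      simp [specF, mySplit, swapRun, PySem.Chars.join, List.intercalate, List.intersperse]
    · simp [specF, mySplit, hc, swapRun, PySem.Chars.join, List.intercalate]
  | case3 a b rest h ih =>
    obtain ⟨ha, hb⟩ := h
    obtain ⟨p, ps, hps⟩ : ∃ p ps, mySplit rest = p :: ps := by
      cases hm : mySplit rest with
      | nil => exact absurd hm (mySplit_ne_nil rest)
      | cons p ps => exact ⟨p, ps, rfl⟩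
    have hsplit : mySplit (a :: b :: rest) = (a :: b :: p) :: ps := by
      simp [mySplit, ha, hb, hps]
    rw [specF, if_pos ⟨ha, hb⟩, hsplit]
    simp only [List.map_cons]
    rw [show swapRun (a :: b :: p) = b :: a :: swapRun p from rfl]
    rw [join_cons_head, join_cons_head]
    rw [ih, hps]
    simp
  | case4 a b rest h ih =>
    rw [specF, if_neg h]
    by_cases ha : a = ' '
    · subst ha
      have hsplit : mySplit (' ' :: b :: rest) = [] :: mySplit (b :: rest) := by simp [mySplit]
      rw [hsplit, List.map_cons]
      rw [show swapRun [] = [] from rfl]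
      rw [join_cons_ne [] _ (by simp [mySplit_ne_nil])]
      rw [ih]
      simp
    · have hb : b = ' ' := by
        by_contra hb
        exact h ⟨ha, hb⟩
      subst hb
      have hsplit : mySplit (a :: ' ' :: rest) = [a] :: mySplit rest := by
        simp [mySplit, ha]
      have hsplit2 : mySplit (' ' :: rest) = [] :: mySplit rest := by simp [mySplit]
      rw [hsplit, List.map_cons]
      rw [show swapRun [a] = [a] from rfl]
      rw [join_cons_ne [a] _ (by simp [mySplit_ne_nil])]
      rw [ih, hsplit2, List.map_cons]
      rw [show swapRun [] = [] from rfl]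
      rw [join_cons_ne [] _ (by simp [mySplit_ne_nil])]
      simp

-- splitOn = mySplit
theorem splitOn_go_eq (fuel : Nat) (l cur : List Char) (acc : List (List Char)) (h : l.length < fuel) :
    PySem.Chars.splitOn.go [' '] fuel l cur acc
      = acc.reverse ++ (match mySplit l with
          | [] => [cur.reverse]
          | p :: ps => (cur.reverse ++ p) :: ps) := by
  induction fuel generalizing l cur acc with
  | zero => omega
  | succ f ih =>
    cases l with
    | nil =>
      rw [PySem.Chars.splitOn.go]
      · simp [mySplit]
      · omega
    | cons c rest =>
      rw [PySem.Chars.splitOn.go]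
      by_cases hc : c = ' '
      · subst hc
        rw [if_pos (by simp [List.isPrefixOf])]
        have := ih rest [] (cur.reverse :: acc) (by simp at h ⊢; omega)
        rw [show List.drop [' '].length (' ' :: rest) = rest from by simp]
        rw [this]
        obtain ⟨p, ps, hps⟩ : ∃ p ps, mySplit rest = p :: ps := by
          cases hm : mySplit rest with
          | nil => exact absurd hm (mySplit_ne_nil rest)
          | cons p ps => exact ⟨p, ps, rfl⟩
        simp [mySplit, hps]
      · rw [if_neg (by simp [List.isPrefixOf]; exact fun hh => hc hh.symm)]
        have := ih rest (c :: cur) acc (by simp at h ⊢; omega)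
        rw [this]
        obtain ⟨p, ps, hps⟩ : ∃ p ps, mySplit rest = p :: ps := by
          cases hm : mySplit rest with
          | nil => exact absurd hm (mySplit_ne_nil rest)
          | cons p ps => exact ⟨p, ps, rfl⟩
        simp [mySplit, hc, hps]

theorem splitOn_eq (cs : List Char) : PySem.Chars.splitOn cs [' '] = mySplit cs := by
  rw [PySem.Chars.splitOn]
  rw [splitOn_go_eq cs.length.succ cs [] [] (by omega)]
  obtain ⟨p, ps, hps⟩ : ∃ p ps, mySplit cs = p :: ps := by
    cases hm : mySplit cs with
    | nil => exact absurd hm (mySplit_ne_nil cs)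
    | cons p ps => exact ⟨p, ps, rfl⟩
  simp [hps]

-- ===== VERDICT (by name: the statement is the Claim_ definition above) =====
theorem swap_adjacent_chars_spec : Claim_equal_swap_adjacent_chars := by
  intro s _
  unfold Spec_swap_adjacent_chars
  show String.ofList (swapLoopA s.toList 0 ((s.toList.length : Int) - 1)) = _
  rw [loopA_spec]
  unfold swap_adjacent_chars_alt
  rw [splitOn_eq]
  rw [PySem.Str.join]
  congr 1
  rw [specF_eq_join]
  congr 1
  simp [List.map_map, Function.comp, swapTokB_eq]
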